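-- pv_equiv track=rewrite | github.com/draberf/aoc2023 | aoc.py | dayThirteen
-- ===== SOURCE A (Python) =====
-- ADVANCED = False
--
-- def dayThirteen(input):
--
--     def findOneDifference(line1, line2) -> int:
--         if line1 == line2: return -1
--
--         diff = 0
--         index = 0
--
--         for i, (c1, c2) in enumerate(zip(line1, line2)):
--             if c1 != c2:
--                 diff += 1
--                 index = i
--             if diff > 1: return -1
--         return index
--
--     def findSymmetry(group) -> int:
--
--         # i -> indicates *after* which line we show symmetry
--         for i in range(len(group)-1):
--             valid = True
--             smudgeFound = False
--             for ii in range(1+min(i, len(group)-i-2)):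
--                 if group[i-ii] != group[i+ii+1]:
--                     if ADVANCED and not smudgeFound:
--                         if findOneDifference(group[i-ii], group[i+ii+1]) > -1:
--                             smudgeFound = True
--                             continue
--                     valid=False
--                     break
--
--             if valid and (smudgeFound == ADVANCED):
--                 return i + 1
--         return 0
--
--     def checkGroupForSymmetries(group) -> int:
--
--         t_group = ["".join(list(tuple)) for tuple in zip(*group)]
--         return 100 * findSymmetry(group) + findSymmetry(t_group)
--
--     group = []
--     acc = 0
--
--     for line in input:
--         if not line:
--             acc += checkGroupForSymmetries(group)
--             group = []
--         else:
--             group.append(line)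
--
--     acc += checkGroupForSymmetries(group)
--
--     return acc
-- ===== SOURCE B (Python) =====
-- def dayThirteen(input):
--     def findSplit(g):
--         n = len(g)
--         bad = set()
--         for j in range(n):
--             for k in range(j + 1, n):
--                 if (j + k) % 2 == 1 and g[j] != g[k]:
--                     bad.add((j + k + 1) // 2)
--         for i in range(1, n):
--             if i not in bad:
--                 return i
--         return 0
--
--     def score(g):
--         cols = ["".join(c) for c in zip(*g)]
--         return 100 * findSplit(g) + findSplit(cols)
--
--     groups = []
--     current = []
--     for line in input:
--         if line:
--             current.append(line)
--         else:
--             groups.append(current)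
--             current = []
--     groups.append(current)
--     return sum(map(score, groups))
-- ===== Notes on version B (the rewrite author's own statement) =====
-- stated objective: alternative
-- what changed: Instead of verifying each candidate reflection line by expanding mirrored pairs around it, B makes one pass over all index pairs (j,k), records every center invalidated by a mismatching odd-sum pair in a 'bad' set, and then returns the first center absent from that set; groups are collected into a list and their scores summed rather than accumulated in the grouping loop.
import Mathlib
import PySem

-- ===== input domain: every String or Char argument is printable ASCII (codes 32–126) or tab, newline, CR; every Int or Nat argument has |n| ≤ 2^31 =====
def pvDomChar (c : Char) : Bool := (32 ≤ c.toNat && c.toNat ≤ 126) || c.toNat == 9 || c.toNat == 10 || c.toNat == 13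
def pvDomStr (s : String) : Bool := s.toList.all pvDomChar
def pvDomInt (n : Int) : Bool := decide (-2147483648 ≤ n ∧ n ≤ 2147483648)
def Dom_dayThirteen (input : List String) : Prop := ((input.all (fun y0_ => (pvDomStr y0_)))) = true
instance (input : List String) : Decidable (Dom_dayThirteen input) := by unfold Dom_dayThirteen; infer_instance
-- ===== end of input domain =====

-- B finds reflection lines by a different algorithm: one pass over ALL index pairs (j,k) records
-- every center invalidated by a mismatching mirror pair in a set, then the first center absent
-- from that set is returned; groups are collected into a list and their scores summed.
-- Objective: alternative decomposition (same asymptotic cost; no speed claim).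

-- ===== PORT A =====
def pvADVANCED : Bool := false

-- loop of findOneDifference over enumerate(zip(line1, line2)) with (diff, index) state
def pvFodLoop : List (Nat × (Char × Char)) → Int → Int → Int
  | [], _, index => index
  | (i, (c1, c2)) :: rest, diff, index =>
    let diff' := if c1 != c2 then diff + 1 else diff
    let index' := if c1 != c2 then (i : Int) else index
    if diff' > 1 then -1 else pvFodLoop rest diff' index'

def pvFindOneDifference (line1 line2 : String) : Int :=
  if line1 == line2 then -1
  else pvFodLoop ((line1.toList.zip line2.toList).zipIdx.map (fun p => (p.2, p.1))) 0 0

-- inner 'for ii in range(...)' loop of findSymmetry; returns (valid, smudgeFound)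
def pvFsInner (group : List String) (i : Nat) : Bool → List Nat → Bool × Bool
  | smudge, [] => (true, smudge)
  | smudge, ii :: rest =>
    if group.getD (i - ii) "" != group.getD (i + ii + 1) "" then
      if pvADVANCED && !smudge then
        if pvFindOneDifference (group.getD (i - ii) "") (group.getD (i + ii + 1) "") > -1 then
          pvFsInner group i true rest
        else (false, smudge)
      else (false, smudge)
    else pvFsInner group i smudge rest

-- outer 'for i in range(len(group)-1)' loop of findSymmetry
def pvFsLoop (group : List String) : List Nat → Int
  | [] => 0
  | i :: rest =>
    let r := pvFsInner group i false (List.range (1 + min i (group.length - i - 2)))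
    if r.1 && (r.2 == pvADVANCED) then (i : Int) + 1 else pvFsLoop group rest

def pvFindSymmetry (group : List String) : Int :=
  pvFsLoop group (List.range (group.length - 1))

-- '["".join(list(tuple)) for tuple in zip(*group)]' — zip truncates to the shortest row
-- (this line is identical in A and in Source B, so it is shared by both ports)
def pvTransposeJoin (group : List String) : List String :=
  (List.range (((group.map String.length).min?).getD 0)).map
    (fun j => String.ofList (group.map (fun s => s.toList.getD j ' ')))

def pvCheckGroup (group : List String) : Int :=
  100 * pvFindSymmetry group + pvFindSymmetry (pvTransposeJoin group)

-- the main 'for line in input' loop with (group, acc) state, plus the trailing accumulation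
def pvMainA : List String → List String → Int → Int
  | [], group, acc => acc + pvCheckGroup group
  | line :: rest, group, acc =>
    if line == "" then pvMainA rest [] (acc + pvCheckGroup group)
    else pvMainA rest (group ++ [line]) acc

def dayThirteen (input : List String) : Int := pvMainA input [] 0

-- ===== PORT B =====
-- the nested 'for j … for k …' pass: every mismatching pair (j,k) with odd j+k
-- invalidates the reflection center (j+k+1)//2; collected in a set
def pvBad (g : List String) : PySem.Set Nat :=
  (List.range g.length).foldl (fun s j =>
    (List.range' (j + 1) (g.length - (j + 1))).foldl (fun s k =>
      if (j + k) % 2 == 1 && g.getD j "" != g.getD k "" then PySem.Set.add s ((j + k + 1) / 2)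
      else s) s)
    PySem.Set.empty

-- 'for i in range(1, n): if i not in bad: return i' / 'return 0'
def pvBFindLoop (bad : PySem.Set Nat) : List Nat → Int
  | [] => 0
  | i :: rest => if !(PySem.Set.contains bad i) then (i : Int) else pvBFindLoop bad rest

def pvFindSplit (g : List String) : Int :=
  pvBFindLoop (pvBad g) (List.range' 1 (g.length - 1))

def pvScore (g : List String) : Int :=
  100 * pvFindSplit g + pvFindSplit (pvTransposeJoin g)

-- builds the list of groups (splitting the input at empty lines)
def pvBGroups : List String → List (List String) → List String → List (List String)
  | [], groups, current => groups ++ [current]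
  | line :: rest, groups, current =>
    if line == "" then pvBGroups rest (groups ++ [current]) []
    else pvBGroups rest groups (current ++ [line])

def dayThirteen_alt (input : List String) : Int :=
  ((pvBGroups input [] []).map pvScore).sum

-- ===== PRECONDITION & SPEC =====
def Spec_dayThirteen (input : List String) (out : Int) : Prop := out = dayThirteen_alt input
instance (input : List String) (out : Int) : Decidable (Spec_dayThirteen input out) := by unfold Spec_dayThirteen; infer_instance

-- ===== CLAIM (what is proved, stated in full; the proofs are below) =====
def Claim_equal_dayThirteen : Prop := ∀ (input : List String), Dom_dayThirteen input → Spec_dayThirteen input (dayThirteen input)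

-- ===== LEMMAS AND PROOFS =====

-- with ADVANCED = False the inner loop is just 'all pairs equal', smudgeFound stays false
theorem pvFsInner_eq_all (g : List String) (i : Nat) (l : List Nat) :
    pvFsInner g i false l
      = (l.all (fun ii => g.getD (i - ii) "" == g.getD (i + ii + 1) ""), false) := by
  induction l with
  | nil => simp [pvFsInner]
  | cons ii rest ih =>
    rw [pvFsInner]
    by_cases h : g[i - ii]?.getD "" = g[i + ii + 1]?.getD ""
    · rw [if_neg (by simp [h]), ih]
      have h' : (g.getD (i - ii) "" == g.getD (i + ii + 1) "") = true := by simp [h]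
      rw [List.all_cons, h']
      simp
    · rw [if_pos (by simp [h]), if_neg (by decide)]
      have h' : (g.getD (i - ii) "" == g.getD (i + ii + 1) "") = false := by
        simp [h]
      rw [List.all_cons, h']
      simp

-- membership after a fold whose step adds Q-elements to the set
theorem mem_foldl_step (step : Nat → PySem.Set Nat → PySem.Set Nat) (Q : Nat → Nat → Prop)
    (h : ∀ j s y, y ∈ step j s ↔ y ∈ s ∨ Q j y) :
    ∀ (l : List Nat) (s0 : PySem.Set Nat) (y : Nat),
      y ∈ l.foldl (fun s j => step j s) s0 ↔ y ∈ s0 ∨ ∃ j ∈ l, Q j y := by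
  intro l
  induction l with
  | nil => simp
  | cons j rest ih =>
    intro s0 y
    simp only [List.foldl_cons, ih, h, List.mem_cons]
    constructor
    · rintro (( hy | hq ) | ⟨j', hj', hq⟩)
      · exact Or.inl hy
      · exact Or.inr ⟨j, Or.inl rfl, hq⟩
      · exact Or.inr ⟨j', Or.inr hj', hq⟩
    · rintro (hy | ⟨j', (rfl | hj'), hq⟩)
      · exact Or.inl (Or.inl hy)
      · exact Or.inl (Or.inr hq)
      · exact Or.inr ⟨j', hj', hq⟩

theorem mem_pvBad (g : List String) (y : Nat) :
    y ∈ pvBad g ↔ ∃ j k, j < g.length ∧ j < k ∧ k < g.length ∧ (j + k) % 2 = 1 ∧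
      g.getD j "" ≠ g.getD k "" ∧ (j + k + 1) / 2 = y := by
  have hinner : ∀ (j : Nat) (s : PySem.Set Nat) (y : Nat),
      y ∈ (List.range' (j + 1) (g.length - (j + 1))).foldl
            (fun s k => if ((j + k) % 2 == 1 && g.getD j "" != g.getD k "") then
              PySem.Set.add s ((j + k + 1) / 2) else s) s
        ↔ y ∈ s ∨ ∃ k ∈ List.range' (j + 1) (g.length - (j + 1)),
            ((j + k) % 2 == 1 && g.getD j "" != g.getD k "") = true ∧ y = (j + k + 1) / 2 := by
    intro j
    apply mem_foldl_step
    intro k s y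
    by_cases hc : ((j + k) % 2 == 1 && g.getD j "" != g.getD k "") = true
    · rw [if_pos hc]
      exact Iff.trans (PySem.Set.mem_add _ _ _) (or_congr Iff.rfl (and_iff_right hc).symm)
    · rw [if_neg hc]
      constructor
      · exact Or.inl
      · rintro (hy | ⟨hq, _⟩)
        · exact hy
        · exact absurd hq hc
  have houter := mem_foldl_step
      (fun j s => (List.range' (j + 1) (g.length - (j + 1))).foldl
        (fun s k => if ((j + k) % 2 == 1 && g.getD j "" != g.getD k "") then
          PySem.Set.add s ((j + k + 1) / 2) else s) s)
      (fun j y => ∃ k ∈ List.range' (j + 1) (g.length - (j + 1)),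
        ((j + k) % 2 == 1 && g.getD j "" != g.getD k "") = true ∧ y = (j + k + 1) / 2)
      hinner (List.range g.length) PySem.Set.empty y
  rw [pvBad]
  refine houter.trans ?_
  constructor
  · rintro (h0 | ⟨j, hj, k, hk, hcond, rfl⟩)
    · exact absurd h0 (by simp [PySem.Set.empty])
    · rw [List.mem_range] at hj
      rw [List.mem_range'_1] at hk
      rw [Bool.and_eq_true, beq_iff_eq, bne_iff_ne] at hcond
      exact ⟨j, k, hj, by omega, by omega, hcond.1, hcond.2, rfl⟩
  · rintro ⟨j, k, hj, hjk, hk, hodd, hne, rfl⟩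
    refine Or.inr ⟨j, List.mem_range.mpr hj, k, List.mem_range'_1.mpr ⟨by omega, by omega⟩, ?_, rfl⟩
    rw [Bool.and_eq_true, beq_iff_eq, bne_iff_ne]
    exact ⟨hodd, hne⟩

-- center i+1 is absent from the bad set iff A's window scan at index i finds all pairs equal
theorem not_mem_pvBad_iff (g : List String) (i : Nat) (hi : i < g.length - 1) :
    (¬ (i + 1) ∈ pvBad g)
      ↔ (List.range (1 + min i (g.length - i - 2))).all
          (fun ii => g.getD (i - ii) "" == g.getD (i + ii + 1) "") = true := by
  rw [mem_pvBad]
  simp only [List.all_eq_true, List.mem_range, beq_iff_eq]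
  constructor
  · intro hno ii hii
    by_contra hne
    exact hno ⟨i - ii, i + ii + 1, by omega, by omega, by omega, by omega, fun heq => hne heq, by omega⟩
  · rintro hall ⟨j, k, hj, hjk, hk, hodd, hne, hc⟩
    have hjk' : j + k = 2 * i + 1 := by omega
    have hji : j ≤ i := by omega
    have hii : i - j < 1 + min i (g.length - i - 2) := by omega
    have := hall (i - j) hii
    have e1 : i - (i - j) = j := by omega
    have e2 : i + (i - j) + 1 = k := by omega
    rw [e1, e2] at this
    exact hne this

theorem pvLoop_eq (g : List String) :
    ∀ l : List Nat, (∀ i ∈ l, i < g.length - 1) →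
      pvFsLoop g l = pvBFindLoop (pvBad g) (l.map (· + 1)) := by
  intro l
  induction l with
  | nil => intro _; rfl
  | cons i rest ih =>
    intro hmem
    have hi : i < g.length - 1 := hmem i (by simp)
    simp only [pvFsLoop, pvFsInner_eq_all, List.map_cons, pvBFindLoop, pvADVANCED]
    simp only [beq_self_eq_true, Bool.and_true]
    have hmb : (!(PySem.Set.contains (pvBad g) (i + 1)))
        = (List.range (1 + min i (g.length - i - 2))).all
            (fun ii => g.getD (i - ii) "" == g.getD (i + ii + 1) "") := by
      by_cases hm : (i + 1) ∈ pvBad g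
      · rw [(PySem.Set.contains_iff _ _).mpr hm,
          Bool.eq_false_iff.mpr (fun hall => (not_mem_pvBad_iff g i hi).mpr hall hm)]
        rfl
      · rw [Bool.eq_false_iff.mpr (fun hc => hm ((PySem.Set.contains_iff _ _).mp hc)),
          (not_mem_pvBad_iff g i hi).mp hm]
        rfl
    rw [hmb]
    split
    · push_cast; ring
    · exact ih (fun j hj => hmem j (List.mem_cons_of_mem _ hj))

theorem pvFindSym_eq (g : List String) : pvFindSymmetry g = pvFindSplit g := by
  rw [pvFindSymmetry, pvFindSplit]
  have hr : List.range' 1 (g.length - 1) = (List.range (g.length - 1)).map (· + 1) := by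
    rw [List.range'_eq_map_range]
    exact List.map_congr_left (fun x _ => by omega)
  rw [hr]
  apply pvLoop_eq
  intro i hi
  rw [List.mem_range] at hi
  omega

theorem pvScore_eq (g : List String) : pvCheckGroup g = pvScore g := by
  rw [pvCheckGroup, pvScore, pvFindSym_eq, pvFindSym_eq]

theorem pvMainA_shift (lines : List String) :
    ∀ (group : List String) (acc : Int),
      pvMainA lines group acc = pvMainA lines group 0 + acc := by
  induction lines with
  | nil => intro group acc; simp only [pvMainA]; omega
  | cons line rest ih =>
    intro group acc
    by_cases h : line = ""
    · subst h
      have e1 : pvMainA ("" :: rest) group acc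
          = pvMainA rest [] (acc + pvCheckGroup group) := by simp [pvMainA]
      have e2 : pvMainA ("" :: rest) group 0
          = pvMainA rest [] (0 + pvCheckGroup group) := by simp [pvMainA]
      rw [e1, e2, ih [] (acc + pvCheckGroup group), ih [] (0 + pvCheckGroup group)]
      ring
    · have e1 : ∀ a : Int, pvMainA (line :: rest) group a
          = pvMainA rest (group ++ [line]) a := by intro a; simp [pvMainA, h]
      rw [e1, e1]
      exact ih (group ++ [line]) acc

theorem pvMain_eq (lines : List String) :
    ∀ (groups : List (List String)) (current : List String),
      ((pvBGroups lines groups current).map pvScore).sum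
        = (groups.map pvScore).sum + pvMainA lines current 0 := by
  induction lines with
  | nil =>
    intro groups current
    simp [pvBGroups, pvMainA, pvScore_eq]
  | cons line rest ih =>
    intro groups current
    by_cases h : line = ""
    · subst h
      have e1 : pvBGroups ("" :: rest) groups current
          = pvBGroups rest (groups ++ [current]) [] := by simp [pvBGroups]
      have e2 : pvMainA ("" :: rest) current 0
          = pvMainA rest [] (0 + pvCheckGroup current) := by simp [pvMainA]
      rw [e1, e2, ih (groups ++ [current]) [],
        pvMainA_shift rest [] (0 + pvCheckGroup current)]
      simp [pvScore_eq]
      ring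
    · have e1 : pvBGroups (line :: rest) groups current
          = pvBGroups rest groups (current ++ [line]) := by simp [pvBGroups, h]
      have e2 : pvMainA (line :: rest) current 0
          = pvMainA rest (current ++ [line]) 0 := by simp [pvMainA, h]
      rw [e1, e2]
      exact ih groups (current ++ [line])

-- ===== VERDICT (by name: the statement is the Claim_ definition above) =====
theorem dayThirteen_spec : Claim_equal_dayThirteen := by
  intro input _
  show dayThirteen input = dayThirteen_alt input
  rw [dayThirteen, dayThirteen_alt, pvMain_eq input [] []]
  simp
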